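-- pv_equiv track=rewrite | github.com/guicvsub/python-exercicios | cp1 /cp1.py | separar_equipamentos
-- ===== SOURCE A (Python) =====
-- def separar_equipamentos(dicionario_equipamentos):
--     pendentes = []
--     concluídos = []
--
--     for status, equipamentos in dicionario_equipamentos.items():
--         if status == 0:
--             pendentes.extend(equipamentos)  # Adiciona os equipamentos pendentes
--         elif status == 1:
--             concluídos.extend(equipamentos)  # Adiciona os equipamentos concluídos
--
--     return pendentes, concluídos
-- ===== SOURCE B (Python) =====
-- def separar_equipamentos(dicionario_equipamentos):
--     pendentes = list(dicionario_equipamentos.get(0, []))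
--     concluídos = list(dicionario_equipamentos.get(1, []))
--     return pendentes, concluídos
-- ===== Notes on version B (the rewrite author's own statement) =====
-- stated objective: simpler
-- what changed: Replaced the scan over all dict items with two direct dict.get lookups for keys 0 and 1 (dict keys are unique, so each branch of A fires at most once).
import Mathlib
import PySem

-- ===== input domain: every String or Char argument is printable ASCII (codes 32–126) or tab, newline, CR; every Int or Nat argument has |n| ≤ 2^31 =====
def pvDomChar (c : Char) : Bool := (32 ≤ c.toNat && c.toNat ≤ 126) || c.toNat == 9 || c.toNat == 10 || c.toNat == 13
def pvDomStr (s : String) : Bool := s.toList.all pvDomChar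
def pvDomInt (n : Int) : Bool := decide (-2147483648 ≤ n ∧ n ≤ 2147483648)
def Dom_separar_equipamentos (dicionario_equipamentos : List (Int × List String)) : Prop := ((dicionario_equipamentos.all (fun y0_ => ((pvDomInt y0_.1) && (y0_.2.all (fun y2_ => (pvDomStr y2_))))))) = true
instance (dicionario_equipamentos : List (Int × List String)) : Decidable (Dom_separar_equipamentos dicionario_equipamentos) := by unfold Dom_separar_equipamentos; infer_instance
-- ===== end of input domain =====

-- B replaces A's scan over all dict items with two direct lookups (keys 0 and 1): simpler.


-- ===== PORT A =====
-- the for-loop over .items() with the two extend-accumulators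
def sepLoop : List (Int × List String) → List String → List String → List String × List String
  | [], pendentes, concluidos => (pendentes, concluidos)
  | (status, equipamentos) :: t, pendentes, concluidos =>
    if status = 0 then sepLoop t (pendentes ++ equipamentos) concluidos
    else if status = 1 then sepLoop t pendentes (concluidos ++ equipamentos)
    else sepLoop t pendentes concluidos

def separar_equipamentos (dicionario_equipamentos : List (Int × List String)) : List String × List String :=
  sepLoop dicionario_equipamentos [] []

-- ===== PORT B =====
def separar_equipamentos_alt (dicionario_equipamentos : List (Int × List String)) : List String × List String :=
  ((PySem.Dict.mk dicionario_equipamentos).getD 0 [],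
   (PySem.Dict.mk dicionario_equipamentos).getD 1 [])

-- ===== PRECONDITION & SPEC =====
-- The association list stands for a Python dict, whose keys are unique; Pre_ states exactly that
-- (every input the Python programs can receive satisfies it).
def Pre_separar_equipamentos (dicionario_equipamentos : List (Int × List String)) : Prop :=
  (dicionario_equipamentos.map Prod.fst).Nodup
instance (dicionario_equipamentos : List (Int × List String)) : Decidable (Pre_separar_equipamentos dicionario_equipamentos) := by unfold Pre_separar_equipamentos; infer_instance
def pvWitness_separar_equipamentos : (List (Int × List String)) := [(0, ["fan"]), (1, ["pc"]), (2, ["tv"])]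

def Spec_separar_equipamentos (dicionario_equipamentos : List (Int × List String)) (out : List String × List String) : Prop := out = separar_equipamentos_alt dicionario_equipamentos
instance (dicionario_equipamentos : List (Int × List String)) (out : List String × List String) : Decidable (Spec_separar_equipamentos dicionario_equipamentos out) := by unfold Spec_separar_equipamentos; infer_instance

-- ===== CLAIM (what is proved, stated in full; the proofs are below) =====
def Claim_equal_separar_equipamentos : Prop := ∀ (dicionario_equipamentos : List (Int × List String)), Dom_separar_equipamentos dicionario_equipamentos → Pre_separar_equipamentos dicionario_equipamentos → Spec_separar_equipamentos dicionario_equipamentos (separar_equipamentos dicionario_equipamentos)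

-- ===== LEMMAS AND PROOFS =====
theorem getD_mk_not_mem (l : List (Int × List String)) (k : Int)
    (h : k ∉ l.map Prod.fst) : (PySem.Dict.mk l).getD k [] = [] := by
  induction l with
  | nil => simp [PySem.Dict.getD, PySem.Dict.get?]
  | cons hd t ih =>
    simp only [List.map_cons, List.mem_cons, not_or] at h
    rcases hd with ⟨k', v⟩
    rw [PySem.Dict.getD_eq_get?_getD, PySem.Dict.get?_mk_cons]
    have : (k' == k) = false := by
      simp only [beq_eq_false_iff_ne]
      exact fun e => h.1 e.symm
    rw [this]
    simpa [← PySem.Dict.getD_eq_get?_getD] using ih h.2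

theorem getD_mk_cons (k' : Int) (v : List String) (t : List (Int × List String)) (k : Int) :
    (PySem.Dict.mk ((k', v) :: t)).getD k [] =
      if k' = k then v else (PySem.Dict.mk t).getD k [] := by
  rw [PySem.Dict.getD_eq_get?_getD, PySem.Dict.get?_mk_cons]
  by_cases e : k' = k <;> simp [e, PySem.Dict.getD_eq_get?_getD]

theorem sepLoop_eq (l : List (Int × List String)) (p c : List String)
    (h : (l.map Prod.fst).Nodup) :
    sepLoop l p c = (p ++ (PySem.Dict.mk l).getD 0 [], c ++ (PySem.Dict.mk l).getD 1 []) := by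
  induction l generalizing p c with
  | nil => simp [sepLoop, PySem.Dict.getD, PySem.Dict.get?]
  | cons hd t ih =>
    rcases hd with ⟨s, e⟩
    simp only [List.map_cons, List.nodup_cons] at h
    rw [getD_mk_cons, getD_mk_cons]
    by_cases h0 : s = 0
    · subst h0
      have : (0 : Int) ∉ t.map Prod.fst := h.1
      simp [sepLoop, ih _ _ h.2, getD_mk_not_mem t 0 this]
    · by_cases h1 : s = 1
      · subst h1
        have : (1 : Int) ∉ t.map Prod.fst := h.1
        simp [sepLoop, ih _ _ h.2, getD_mk_not_mem t 1 this]
      · simp [sepLoop, h0, h1, ih _ _ h.2]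

-- ===== VERDICT (by name: the statement is the Claim_ definition above) =====
theorem separar_equipamentos_spec : Claim_equal_separar_equipamentos := by
  intro d _ hpre
  unfold Spec_separar_equipamentos separar_equipamentos separar_equipamentos_alt
  rw [sepLoop_eq d [] [] hpre]
  simp
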